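-- pv_equiv track=rewrite | github.com/philippeschoeb/photonic_qml_benchmarking | tabular_data/models/photonic_based_utils.py | get_spaced_state
-- ===== SOURCE A (Python) =====
-- def get_spaced_state(m, n):
--     state = [0] * m
--     placed = 0
--
--     # Start with the 01 pattern: place photons on odd indices first.
--     for i in range(1, m, 2):
--         if placed >= n:
--             break
--         state[i] = 1
--         placed += 1
--
--     # Fallback if n exceeds available odd positions.
--     for i in range(0, m, 2):
--         if placed >= n:
--             break
--         state[i] = 1
--         placed += 1
--
--     return state
-- ===== SOURCE B (Python) =====
-- def get_spaced_state(m, n):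
--     filled_odds = min(n, m // 2)
--     return [1 if (i % 2 == 1 and (i - 1) // 2 < n)
--               or (i % 2 == 0 and i // 2 < n - filled_odds) else 0
--             for i in range(m)]
-- ===== Notes on version B (the rewrite author's own statement) =====
-- stated objective: simpler
-- what changed: Replaces A's two stateful breaking loops (a running 'placed' counter with in-place writes, odd indices first, then evens) by precomputing filled_odds = min(n, m // 2) and building the list in one comprehension where each index is decided independently from its parity rank.
import Mathlib
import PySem

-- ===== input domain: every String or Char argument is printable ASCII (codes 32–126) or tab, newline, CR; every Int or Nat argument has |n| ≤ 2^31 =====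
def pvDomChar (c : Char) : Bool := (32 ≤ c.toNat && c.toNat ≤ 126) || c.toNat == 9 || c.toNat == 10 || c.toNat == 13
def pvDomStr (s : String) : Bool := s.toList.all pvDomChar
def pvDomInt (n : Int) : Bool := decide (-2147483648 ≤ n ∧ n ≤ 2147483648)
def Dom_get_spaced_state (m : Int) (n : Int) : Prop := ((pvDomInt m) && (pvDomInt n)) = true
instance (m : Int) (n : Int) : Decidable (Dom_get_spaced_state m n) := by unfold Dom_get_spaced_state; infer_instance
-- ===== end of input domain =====

-- B replaces A's two counter-driven breaking loops by a single per-index closed-form fill (simpler decomposition, same O(m) cost).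

-- ===== PORT A =====
-- the shared loop body of A's two for-loops: 'if placed >= n: break; state[i] = 1; placed += 1'
-- (state[i] = 1 via List.set i.toNat: every i comes from range(·, m, 2) with len(state) = m, so the
-- index is nonnegative and in range — exact for Python's state[i] = 1 here)
def pvLoopA (idxs : List Int) (state : List Int) (placed : Int) (n : Int) : List Int × Int :=
  match idxs with
  | [] => (state, placed)
  | i :: rest =>
      if placed ≥ n then (state, placed)
      else pvLoopA rest (state.set i.toNat 1) (placed + 1) n

def get_spaced_state (m : Int) (n : Int) : List Int :=
  let state := List.replicate m.toNat (0 : Int)   -- [0] * m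
  let r1 := pvLoopA (PySem.List.pyRange 1 m 2) state 0 n
  let r2 := pvLoopA (PySem.List.pyRange 0 m 2) r1.1 r1.2 n
  r2.1

-- ===== PORT B =====
def get_spaced_state_alt (m : Int) (n : Int) : List Int :=
  let filled_odds := min n (PySem.Int.floordiv m 2)
  (PySem.List.pyRange 0 m 1).map (fun i =>
    if (PySem.Int.mod i 2 = 1 ∧ PySem.Int.floordiv (i - 1) 2 < n)
       ∨ (PySem.Int.mod i 2 = 0 ∧ PySem.Int.floordiv i 2 < n - filled_odds)
    then (1 : Int) else 0)

-- ===== PRECONDITION & SPEC =====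
def Spec_get_spaced_state (m : Int) (n : Int) (out : List Int) : Prop := out = get_spaced_state_alt m n
instance (m : Int) (n : Int) (out : List Int) : Decidable (Spec_get_spaced_state m n out) := by unfold Spec_get_spaced_state; infer_instance

-- ===== CLAIM (what is proved, stated in full; the proofs are below) =====
def Claim_equal_get_spaced_state : Prop := ∀ (m : Int) (n : Int), Dom_get_spaced_state m n → Spec_get_spaced_state m n (get_spaced_state m n)

-- ===== LEMMAS AND PROOFS =====

-- A's break-loop = fold of 'set 1' over the first (n - placed)⁺ indices, counter advanced by that many
theorem pvLoopA_eq (n : Int) : ∀ (idxs state : List Int) (p : Int),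
    pvLoopA idxs state p n =
      ((idxs.take (n - p).toNat).foldl (fun t i => t.set i.toNat 1) state,
       p + ((min (n - p).toNat idxs.length : Nat) : Int)) := by
  intro idxs
  induction idxs with
  | nil => intro s p; simp [pvLoopA]
  | cons i rest ih =>
      intro s p
      by_cases h : p ≥ n
      · have h0 : (n - p).toNat = 0 := by omega
        simp [pvLoopA, h, h0]
      · have hk : (n - p).toNat = (n - (p + 1)).toNat + 1 := by omega
        rw [pvLoopA, if_neg h, ih, hk]
        refine Prod.ext ?_ ?_
        · simp [List.take_succ_cons]
        · simp only [List.length_cons]; omega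

theorem pvFold_length : ∀ (L state : List Int),
    (L.foldl (fun t i => t.set i.toNat 1) state).length = state.length := by
  intro L
  induction L with
  | nil => intro s; rfl
  | cons a L ih => intro s; simp [List.foldl_cons, ih]

theorem pvFold_get (j : Nat) : ∀ (L state : List Int), j < state.length →
    (L.foldl (fun t i => t.set i.toNat 1) state)[j]? =
      if ∃ i ∈ L, i.toNat = j then some 1 else state[j]? := by
  intro L
  induction L with
  | nil => intro s hj; simp
  | cons a L ih =>
      intro s hj
      rw [List.foldl_cons, ih _ (by simpa using hj)]
      by_cases ha : a.toNat = j
      · by_cases hL : ∃ i ∈ L, i.toNat = j <;>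
          simp [ha, hL, hj]
      · by_cases hL : ∃ i ∈ L, i.toNat = j <;>
          simp [ha, hL]

-- membership of j in the first c odd positions 1,3,5,…
theorem pvOddCond (c j : Nat) :
    (∃ i ∈ (List.range c).map (fun k : Nat => (1 : Int) + 2 * (k : Int)), i.toNat = j) ↔
      (j % 2 = 1 ∧ (j - 1) / 2 < c) := by
  constructor
  · rintro ⟨i, hi, h2⟩
    obtain ⟨r, hr, rfl⟩ := List.mem_map.mp hi
    rw [List.mem_range] at hr
    omega
  · rintro ⟨h1, h2⟩
    refine ⟨1 + 2 * (((j - 1) / 2 : Nat) : Int),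
      List.mem_map.mpr ⟨(j - 1) / 2, List.mem_range.mpr (by omega), rfl⟩, by omega⟩

-- membership of j in the first c even positions 0,2,4,…
theorem pvEvenCond (c j : Nat) :
    (∃ i ∈ (List.range c).map (fun k : Nat => (0 : Int) + 2 * (k : Int)), i.toNat = j) ↔
      (j % 2 = 0 ∧ j / 2 < c) := by
  constructor
  · rintro ⟨i, hi, h2⟩
    obtain ⟨r, hr, rfl⟩ := List.mem_map.mp hi
    rw [List.mem_range] at hr
    omega
  · rintro ⟨h1, h2⟩
    refine ⟨0 + 2 * ((j / 2 : Nat) : Int),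
      List.mem_map.mpr ⟨j / 2, List.mem_range.mpr (by omega), rfl⟩, by omega⟩

-- ===== VERDICT (by name: the statement is the Claim_ definition above) =====
theorem get_spaced_state_spec : Claim_equal_get_spaced_state := by
  intro m n _
  unfold Spec_get_spaced_state get_spaced_state get_spaced_state_alt
  by_cases hm : m ≤ 0
  · have h1 : PySem.List.pyRange 1 m 2 = [] := by
      rw [PySem.List.pyRange_of_pos 1 m (by norm_num), if_neg (by omega)]; rfl
    have h2 : PySem.List.pyRange 0 m 2 = [] := by
      rw [PySem.List.pyRange_of_pos 0 m (by norm_num), if_neg (by omega)]; rfl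
    have h3 : PySem.List.pyRange 0 m 1 = [] := PySem.List.pyRange_one_eq_nil hm
    have h4 : m.toNat = 0 := by omega
    simp [h1, h2, h3, h4, pvLoopA]
  · obtain ⟨M, hM⟩ : ∃ M : Nat, m = (M : Int) := ⟨m.toNat, by omega⟩
    subst hM
    have hO : PySem.List.pyRange 1 (M : Int) 2
        = (List.range (M / 2)).map (fun k : Nat => (1 : Int) + 2 * (k : Int)) := by
      rw [PySem.List.pyRange_of_pos 1 (M : Int) (by norm_num)]
      have : (if (1 : Int) < (M : Int) then (((M : Int) - 1 + 2 - 1) / 2).toNat else 0) = M / 2 := by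
        split_ifs <;> omega
      rw [this]
    have hE : PySem.List.pyRange 0 (M : Int) 2
        = (List.range ((M + 1) / 2)).map (fun k : Nat => (0 : Int) + 2 * (k : Int)) := by
      rw [PySem.List.pyRange_of_pos 0 (M : Int) (by norm_num)]
      have : (if (0 : Int) < (M : Int) then (((M : Int) - 0 + 2 - 1) / 2).toNat else 0) = (M + 1) / 2 := by
        split_ifs <;> omega
      rw [this]
    simp only [hO, hE, pvLoopA_eq, ← List.map_take, List.take_range, List.length_map,
      List.length_range]
    apply List.ext_getElem?
    intro j
    by_cases hj : j < M
    · rw [pvFold_get j _ _ (by rw [pvFold_length]; simpa using hj),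
        pvFold_get j _ _ (by simpa using hj),
        PySem.List.getElem?_map_pyRange_zero _ M j hj]
      simp only [pvOddCond, pvEvenCond, List.getElem?_replicate,
        PySem.Int.floordiv_eq_ediv_of_pos (show (0:Int) < 2 by norm_num),
        PySem.Int.mod_eq_emod_of_pos (show (0:Int) < 2 by norm_num)]
      split_ifs <;> simp_all <;> omega
    · rw [List.getElem?_eq_none (by
          rw [pvFold_length, pvFold_length]; simpa using Nat.le_of_not_lt hj),
        List.getElem?_eq_none (by
          simp [PySem.List.length_pyRange_one]; omega)]
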